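-- pv_equiv track=rewrite | github.com/lush93gh/Leet-Code-Python | sorting_and_searching/binary_search/E69.py | mySqrtLowerBound
-- ===== SOURCE A (Python) =====
-- def mySqrtLowerBound(x: int) -> int:
--     lo, hi = 0, x + 1
--     while lo < hi:
--         mid = lo + ((hi - lo) >> 1)
--         square = mid * mid
--         if x <= square:
--             hi = mid
--         else:
--             lo = mid + 1
--     return hi if hi * hi == x else hi - 1
-- ===== SOURCE B (Python) =====
-- def mySqrtLowerBound(x: int) -> int:
--     if x < 2:
--         return x
--     g = x
--     while g * g > x:
--         g = (g + x // g) // 2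
--     return g
-- ===== Notes on version B (the rewrite author's own statement) =====
-- stated objective: alternative
-- what changed: Replaces the binary search over the range up to the input (plus a final perfect-square adjustment) with Newton's integer square-root iteration g = (g + x//g)//2 after an early return for small or negative inputs.
import Mathlib
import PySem

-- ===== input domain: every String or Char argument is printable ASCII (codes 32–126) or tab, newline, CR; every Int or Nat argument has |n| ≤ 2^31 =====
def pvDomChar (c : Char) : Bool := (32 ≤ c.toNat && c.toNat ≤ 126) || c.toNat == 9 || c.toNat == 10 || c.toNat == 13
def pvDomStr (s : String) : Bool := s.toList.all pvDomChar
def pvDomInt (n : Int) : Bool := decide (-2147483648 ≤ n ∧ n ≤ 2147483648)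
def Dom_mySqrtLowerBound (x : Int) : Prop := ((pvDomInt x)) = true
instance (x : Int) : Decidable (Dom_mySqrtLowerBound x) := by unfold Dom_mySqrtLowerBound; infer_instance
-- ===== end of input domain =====

-- B replaces A's binary search over [0, x+1] (plus a perfect-square adjustment of the final hi)
-- with Newton's integer square-root iteration g = (g + x//g)//2 after an early return for small or negative inputs.

-- ===== PORT A =====
-- A's while loop: state (lo, hi); returns the final hi.  '(hi - lo) >> 1' is floor division by 2.
def bsA (x lo hi : Int) : Int :=
  if h : lo < hi then
    let mid := lo + PySem.Int.floordiv (hi - lo) 2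
    if x ≤ mid * mid then bsA x lo mid else bsA x (mid + 1) hi
  else hi
termination_by (hi - lo).toNat
decreasing_by
  · have h2 : PySem.Int.floordiv (hi - lo) 2 < hi - lo := by
      rw [PySem.Int.floordiv_lt_iff_lt_mul (by omega)]; omega
    omega
  · have h3 : 0 ≤ PySem.Int.floordiv (hi - lo) 2 := by
      rw [PySem.Int.le_floordiv_iff_mul_le (by omega)]; omega
    omega

def mySqrtLowerBound (x : Int) : Int :=
  let hi := bsA x 0 (x + 1)
  if hi * hi = x then hi else hi - 1

-- ===== PORT B =====
-- B's while loop.  The extra '0 < g' conjunct only totalizes the recursion (it guards the division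
-- and the termination measure); on every state B's Python reaches, g > 0 holds, so it never differs.
def newtonB (x g : Int) : Int :=
  if h : 0 < g ∧ x < g * g then
    newtonB x (PySem.Int.floordiv (g + PySem.Int.floordiv x g) 2)
  else g
termination_by g.toNat
decreasing_by
  have hq : PySem.Int.floordiv x g < g := by
    rw [PySem.Int.floordiv_lt_iff_lt_mul h.1]
    nlinarith [h.2]
  have hlt : PySem.Int.floordiv (g + PySem.Int.floordiv x g) 2 < g := by
    rw [PySem.Int.floordiv_lt_iff_lt_mul (by omega : (0:Int) < 2)]
    omega
  omega

def mySqrtLowerBound_alt (x : Int) : Int :=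
  if x < 2 then x else newtonB x x

-- ===== PRECONDITION & SPEC =====
def Spec_mySqrtLowerBound (x : Int) (out : Int) : Prop := out = mySqrtLowerBound_alt x
instance (x : Int) (out : Int) : Decidable (Spec_mySqrtLowerBound x out) := by unfold Spec_mySqrtLowerBound; infer_instance

-- ===== CLAIM (what is proved, stated in full; the proofs are below) =====
def Claim_equal_mySqrtLowerBound : Prop := ∀ (x : Int), Dom_mySqrtLowerBound x → Spec_mySqrtLowerBound x (mySqrtLowerBound x)

-- ===== LEMMAS AND PROOFS =====

-- A's binary search returns t, the least nonnegative integer with x ≤ t*t, whenever lo ≤ t ≤ hi.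
lemma bsA_eq (x t : Int) (ht0 : 0 ≤ t) (htx : x ≤ t * t)
    (hmin : ∀ m : Int, 0 ≤ m → m < t → m * m < x)
    (lo hi : Int) (h0 : 0 ≤ lo) (h1 : lo ≤ t) (h2 : t ≤ hi) : bsA x lo hi = t := by
  rw [bsA]
  by_cases hlt : lo < hi
  · have hd0 : 0 ≤ PySem.Int.floordiv (hi - lo) 2 := by
      rw [PySem.Int.le_floordiv_iff_mul_le (by omega)]; omega
    have hd1 : PySem.Int.floordiv (hi - lo) 2 < hi - lo := by
      rw [PySem.Int.floordiv_lt_iff_lt_mul (by omega)]; omega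
    rw [dif_pos hlt]
    dsimp only
    set mid := lo + PySem.Int.floordiv (hi - lo) 2 with hmid
    have hm1 : lo ≤ mid := by omega
    have hm2 : mid < hi := by omega
    split
    · next hle =>
      have ht : t ≤ mid := by
        by_contra hc
        exact absurd hle (not_le.2 (hmin mid (by omega) (by omega)))
      exact bsA_eq x t ht0 htx hmin lo mid h0 h1 ht
    · next hgt =>
      have ht : mid + 1 ≤ t := by
        by_contra hc
        have hle2 : t ≤ mid := by omega
        have := mul_self_le_mul_self ht0 hle2
        omega
      exact bsA_eq x t ht0 htx hmin (mid + 1) hi (by omega) ht h2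
  · rw [dif_neg hlt]; omega
termination_by (hi - lo).toNat
decreasing_by
  · omega
  · omega

-- B's Newton iteration, started at any g ≥ s, lands exactly on s = ⌊√x⌋ (s ≥ 1).
lemma newtonB_eq (x s : Int) (hs : 1 ≤ s) (h1 : s * s ≤ x) (h2 : x < (s + 1) * (s + 1))
    (g : Int) (hg : s ≤ g) : newtonB x g = s := by
  rw [newtonB]
  split
  · next hcond =>
    obtain ⟨hg0, hxg⟩ := hcond
    have hq := (PySem.Int.floordiv_eq_iff_of_pos hg0).1
      (rfl : PySem.Int.floordiv x g = PySem.Int.floordiv x g)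
    set q := PySem.Int.floordiv x g with hqdef
    have hql : q < g := by nlinarith [hq.1, hq.2]
    have hstep : s ≤ PySem.Int.floordiv (g + q) 2 := by
      rw [PySem.Int.le_floordiv_iff_mul_le (by omega : (0:Int) < 2)]
      by_contra hc
      push_neg at hc
      nlinarith [sq_nonneg (g - s), hq.1, hq.2]
    exact newtonB_eq x s hs h1 h2 _ hstep
  · next hcond =>
    push_neg at hcond
    have hg0 : 0 < g := by omega
    have hxg : g * g ≤ x := not_lt.1 (by simpa using hcond hg0)
    have hgs : g ≤ s := by
      by_contra hc
      have h5 : s + 1 ≤ g := by omega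
      have := mul_self_le_mul_self (by omega : (0:Int) ≤ s + 1) h5
      omega
    omega
termination_by g.toNat
decreasing_by
  have hlt : PySem.Int.floordiv (g + PySem.Int.floordiv x g) 2 < g := by
    rw [PySem.Int.floordiv_lt_iff_lt_mul (by omega : (0:Int) < 2)]
    omega
  omega

-- ===== VERDICT (by name: the statement is the Claim_ definition above) =====
theorem mySqrtLowerBound_spec : Claim_equal_mySqrtLowerBound := by
  intro x _
  unfold Spec_mySqrtLowerBound mySqrtLowerBound mySqrtLowerBound_alt
  by_cases hx2 : x < 2
  · rw [if_pos hx2]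
    by_cases hx0 : x < 0
    · rw [bsA, dif_neg (by omega)]
      have hne : (x + 1) * (x + 1) ≠ x := by nlinarith [sq_nonneg (2 * x + 1)]
      simp only [hne, if_false]
      omega
    · interval_cases x <;> simp [bsA, PySem.Int.floordiv, Int.fdiv]
  · rw [if_neg hx2]
    push_neg at hx2
    obtain ⟨n, rfl⟩ : ∃ n : ℕ, x = (n : Int) := ⟨x.toNat, by omega⟩
    set s : Int := (Nat.sqrt n : Int) with hsdef
    have hs1 : s * s ≤ (n : Int) := by
      have h := Nat.sqrt_le' n
      rw [pow_two] at h
      rw [hsdef]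
      exact_mod_cast h
    have hs2 : (n : Int) < (s + 1) * (s + 1) := by
      have h := Nat.lt_succ_sqrt' n
      rw [Nat.succ_eq_add_one, pow_two] at h
      rw [hsdef]
      exact_mod_cast h
    have hs0 : 1 ≤ s := by nlinarith
    have hsn : s ≤ (n : Int) := by nlinarith
    -- B side
    have hB : newtonB (n : Int) (n : Int) = s := newtonB_eq _ s hs0 hs1 hs2 _ hsn
    rw [hB]
    -- A side: t = least m ≥ 0 with x ≤ m*m
    by_cases hps : (n : Int) = s * s
    · have hA : bsA (n : Int) 0 ((n : Int) + 1) = s := by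
        apply bsA_eq _ s (by omega) (by omega)
        · intro m hm0 hms
          have := mul_self_le_mul_self hm0 (by omega : m ≤ s - 1)
          nlinarith
        · omega
        · omega
        · omega
      rw [hA, if_pos (by omega)]
    · have hlt : s * s < (n : Int) := lt_of_le_of_ne hs1 (fun h => hps h.symm)
      have hA : bsA (n : Int) 0 ((n : Int) + 1) = s + 1 := by
        apply bsA_eq _ (s + 1) (by omega) (by omega)
        · intro m hm0 hms
          have := mul_self_le_mul_self hm0 (by omega : m ≤ s)
          omega
        · omega
        · omega
        · omega
      rw [hA, if_neg (by omega)]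
      omega
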